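-- pv_equiv track=rewrite | github.com/sulavpanthi/leetcode | 1843-number-of-rectangles-that-can-form-the-largest-square/1843-number-of-rectangles-that-can-form-the-largest-square.py | countGoodRectangles
-- ===== SOURCE A (Python) =====
-- from typing import List
--
-- def countGoodRectangles(rectangles: List[List[int]]) -> int:
--     count = 0
--     max_length = 0
--     for each in rectangles:
--         min_length = min(each[0], each[1])
--         max_length = max(min_length, max_length)
--     for each in rectangles:
--         if max_length <= each[0] and max_length <= each[1]:
--             count += 1
--     return count
-- ===== SOURCE B (Python) =====
-- from typing import List
--
-- def countGoodRectangles(rectangles: List[List[int]]) -> int: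
--     best = 0
--     count = 0
--     for each in rectangles:
--         side = min(each[0], each[1])
--         if side > best:
--             best = side
--             count = 1
--         elif side == best:
--             count += 1
--     return count
-- ===== Notes on version B (the rewrite author's own statement) =====
-- stated objective: alternative
-- what changed: A's two passes (one to compute the max of min(w,h), one to count rectangles reaching it) are fused into a single pass that maintains the running best side and its count with reset-on-new-max.
import Mathlib
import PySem

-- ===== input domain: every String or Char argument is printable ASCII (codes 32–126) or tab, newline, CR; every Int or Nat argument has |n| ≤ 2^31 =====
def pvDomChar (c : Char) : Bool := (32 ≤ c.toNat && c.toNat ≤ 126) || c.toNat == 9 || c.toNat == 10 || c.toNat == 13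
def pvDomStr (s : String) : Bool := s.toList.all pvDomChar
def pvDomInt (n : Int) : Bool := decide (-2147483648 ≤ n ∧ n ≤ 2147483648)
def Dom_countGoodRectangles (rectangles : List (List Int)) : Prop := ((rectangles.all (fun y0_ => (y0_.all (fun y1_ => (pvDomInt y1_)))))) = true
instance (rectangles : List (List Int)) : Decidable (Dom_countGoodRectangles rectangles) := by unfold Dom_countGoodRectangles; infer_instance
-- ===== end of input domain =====

-- ===== PORT A =====
-- B fuses A's two passes into one pass maintaining the running best side and its count (same cost).
-- A: first pass computes max_length = max over rectangles of min(each[0], each[1]); second pass counts.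
def countGoodRectangles (rectangles : List (List Int)) : Int :=
  let max_length : Int := rectangles.foldl
    (fun m each =>
      max (min ((PySem.List.pyGet? each 0).getD 0) ((PySem.List.pyGet? each 1).getD 0)) m) 0
  rectangles.foldl
    (fun c each =>
      if max_length ≤ (PySem.List.pyGet? each 0).getD 0 ∧
         max_length ≤ (PySem.List.pyGet? each 1).getD 0 then c + 1 else c) 0

-- ===== PORT B =====
def pvStepB (st : Int × Int) (each : List Int) : Int × Int :=
  let side := min ((PySem.List.pyGet? each 0).getD 0) ((PySem.List.pyGet? each 1).getD 0)
  if side > st.1 then (side, 1)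
  else if side = st.1 then (st.1, st.2 + 1)
  else st

def countGoodRectangles_alt (rectangles : List (List Int)) : Int :=
  (rectangles.foldl pvStepB (0, 0)).2

-- ===== PRECONDITION & SPEC =====
-- Pre_ excludes exactly the inputs where Python A raises IndexError: a rectangle with fewer than 2 entries.
def Pre_countGoodRectangles (rectangles : List (List Int)) : Prop :=
  ∀ r ∈ rectangles, 2 ≤ r.length
instance (rectangles : List (List Int)) : Decidable (Pre_countGoodRectangles rectangles) := by
  unfold Pre_countGoodRectangles; infer_instance

def pvWitness_countGoodRectangles : List (List Int) := [[5, 8], [3, 9], [5, 12], [16, 5]]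

def Spec_countGoodRectangles (rectangles : List (List Int)) (out : Int) : Prop := out = countGoodRectangles_alt rectangles
instance (rectangles : List (List Int)) (out : Int) : Decidable (Spec_countGoodRectangles rectangles out) := by unfold Spec_countGoodRectangles; infer_instance

-- ===== CLAIM (what is proved, stated in full; the proofs are below) =====
def Claim_equal_countGoodRectangles : Prop := ∀ (rectangles : List (List Int)), Dom_countGoodRectangles rectangles → Pre_countGoodRectangles rectangles → Spec_countGoodRectangles rectangles (countGoodRectangles rectangles)

-- ===== LEMMAS AND PROOFS =====
def pvSide (each : List Int) : Int :=
  min ((PySem.List.pyGet? each 0).getD 0) ((PySem.List.pyGet? each 1).getD 0)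

-- the running max fold of port A, started from b
def pvMaxFrom (l : List (List Int)) (b : Int) : Int :=
  l.foldl (fun m each => max (pvSide each) m) b

theorem pvMaxFrom_ge (l : List (List Int)) (b : Int) : b ≤ pvMaxFrom l b := by
  induction l generalizing b with
  | nil => simp [pvMaxFrom]
  | cons r t ih =>
      have h := ih (max (pvSide r) b)
      simp only [pvMaxFrom, List.foldl] at h ⊢
      exact le_trans (le_max_right _ _) h

theorem pvMaxFrom_mem_le (l : List (List Int)) (b : Int) (r : List Int) (hr : r ∈ l) :
    pvSide r ≤ pvMaxFrom l b := by
  induction l generalizing b with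
  | nil => simp at hr
  | cons x t ih =>
      rcases List.mem_cons.mp hr with h | h
      · subst h
        simp only [pvMaxFrom, List.foldl]
        exact le_trans (le_max_left _ _) (pvMaxFrom_ge t _)
      · simpa [pvMaxFrom, List.foldl] using ih (max (pvSide x) b) h

-- B's fold characterised: the first component is the running max, the second counts
-- occurrences of the final max, plus the carried count if the start was already maximal.
theorem pvStepB_spec (l : List (List Int)) (b c : Int) :
    l.foldl pvStepB (b, c) =
      (pvMaxFrom l b,
       (if pvMaxFrom l b = b then c else 0) + (l.countP (fun r => pvSide r = pvMaxFrom l b)).cast) := by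
  induction l generalizing b c with
  | nil => simp [pvMaxFrom]
  | cons r t ih =>
      have hs : pvStepB (b, c) r =
          if pvSide r > b then (pvSide r, 1) else if pvSide r = b then (b, c + 1) else (b, c) := rfl
      have hfold : List.foldl pvStepB (b, c) (r :: t) = List.foldl pvStepB (pvStepB (b, c) r) t := rfl
      by_cases h1 : pvSide r > b
      · have hM : pvMaxFrom (r :: t) b = pvMaxFrom t (pvSide r) := by
          simp only [pvMaxFrom, List.foldl]
          rw [max_eq_left (le_of_lt h1)]
        rw [hfold, hs, if_pos h1, ih, hM]
        have hb : pvMaxFrom t (pvSide r) ≠ b :=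
          ne_of_gt (lt_of_lt_of_le h1 (pvMaxFrom_ge t _))
        rw [if_neg hb, List.countP_cons]
        refine Prod.ext rfl ?_
        by_cases h2 : pvSide r = pvMaxFrom t (pvSide r)
        · rw [if_pos h2.symm]
          rw [if_pos (decide_eq_true h2 : decide (pvSide r = pvMaxFrom t (pvSide r)) = true)]
          push_cast [Int.add_comm]
          ring
        · rw [if_neg (fun h => h2 h.symm)]
          rw [if_neg (by simpa using h2 : ¬ decide (pvSide r = pvMaxFrom t (pvSide r)) = true)]
          simp
      · have hM : pvMaxFrom (r :: t) b = pvMaxFrom t b := by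
          simp only [pvMaxFrom, List.foldl]
          rw [max_eq_right (not_lt.mp h1)]
        by_cases h2 : pvSide r = b
        · rw [hfold, hs, if_neg h1, if_pos h2, ih, hM]
          refine Prod.ext rfl ?_
          rw [List.countP_cons]
          by_cases h3 : pvMaxFrom t b = b
          · have hPr : pvSide r = pvMaxFrom t b := h2.trans h3.symm
            simp [h3, hPr]
            ring
          · have hPr : ¬ pvSide r = pvMaxFrom t b := fun hc => h3 (by rw [← hc, h2])
            simp [h3, hPr]
        · rw [hfold, hs, if_neg h1, if_neg h2, ih, hM]
          refine Prod.ext rfl ?_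
          rw [List.countP_cons]
          have hPr : ¬ pvSide r = pvMaxFrom t b := by
            intro hc
            have hge := pvMaxFrom_ge t b
            have : pvMaxFrom t b ≤ b := hc ▸ not_lt.mp h1
            exact h2 (hc.trans (le_antisymm this hge))
          simp [hPr]

-- A's counting fold equals countP of "max ≤ side"
theorem pvCountA (l : List (List Int)) (M c : Int) :
    l.foldl (fun c each =>
        if M ≤ (PySem.List.pyGet? each 0).getD 0 ∧ M ≤ (PySem.List.pyGet? each 1).getD 0
        then c + 1 else c) c
      = c + (l.countP (fun r => M ≤ pvSide r)).cast := by
  induction l generalizing c with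
  | nil => simp
  | cons r t ih =>
      have hcond : (M ≤ (PySem.List.pyGet? r 0).getD 0 ∧ M ≤ (PySem.List.pyGet? r 1).getD 0)
          ↔ M ≤ pvSide r := by
        simp [pvSide]
      simp only [List.foldl, List.countP_cons]
      by_cases h : M ≤ pvSide r
      · rw [if_pos (hcond.mpr h), ih]
        simp [h]
        ring
      · rw [if_neg (fun hc => h (hcond.mp hc)), ih]
        simp [h]

theorem countP_congr_side (l : List (List Int)) (M : Int) (hM : ∀ r ∈ l, pvSide r ≤ M) :
    l.countP (fun r => M ≤ pvSide r) = l.countP (fun r => pvSide r = M) := by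
  apply List.countP_congr
  intro r hr
  have h := hM r hr
  simpa using ⟨fun h2 => le_antisymm h h2, fun h2 => ge_of_eq h2⟩

-- ===== VERDICT (by name: the statement is the Claim_ definition above) =====
theorem countGoodRectangles_spec : Claim_equal_countGoodRectangles := by
  intro rectangles _ _
  unfold Spec_countGoodRectangles countGoodRectangles countGoodRectangles_alt
  rw [pvStepB_spec]
  simp only
  rw [pvCountA]
  have hM : rectangles.foldl (fun m each =>
      max (min ((PySem.List.pyGet? each 0).getD 0) ((PySem.List.pyGet? each 1).getD 0)) m) 0
      = pvMaxFrom rectangles 0 := by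
    simp [pvMaxFrom, pvSide]
  rw [hM, countP_congr_side rectangles _ (fun r hr => pvMaxFrom_mem_le rectangles 0 r hr)]
  simp
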